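-- pv_equiv track=rewrite | github.com/EndlessKeep/LiChecker | NER/evaluate_model.py | get_intersection_set
-- ===== SOURCE A (Python) =====
-- def get_intersection_set(labs1, labs2):
--     '''
--     计算两个实体集合的交集
--
--     Args:
--         labs1: 第一个实体集合
--         labs2: 第二个实体集合
--
--     Returns:
--         交集列表
--     '''
--     intersection = []
--     for la1 in labs1:
--         found = False
--         for la2 in labs2:
--             if la1[0] == la2[0]:  # 相同类型的实体
--                 # 检查是否有重叠
--                 for i in range(la1[1], la1[2]):
--                     if i >= la2[1] and i < la2[2]:
--                         intersection.append(la1)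
--                         found = True
--                         break
--             if found:
--                 break
--     return intersection
-- ===== SOURCE B (Python) =====
-- def get_intersection_set(labs1, labs2):
--     # Index labs2 intervals by entity type once; overlap is the closed-form
--     # test max(starts) < min(ends) instead of scanning the integer range.
--     index = {}
--     for t, s, e in labs2:
--         index.setdefault(t, []).append((s, e))
--     return [la for la in labs1
--             if any(max(la[1], s) < min(la[2], e) for s, e in index.get(la[0], []))]
-- ===== Notes on version B (the rewrite author's own statement) =====
-- stated objective: alternative
-- what changed: B builds a per-type index of labs2 once and decides overlap with the closed-form test max(starts) < min(ends), instead of A's nested scan over all of labs2 and over every integer position of the interval.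
import Mathlib
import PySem

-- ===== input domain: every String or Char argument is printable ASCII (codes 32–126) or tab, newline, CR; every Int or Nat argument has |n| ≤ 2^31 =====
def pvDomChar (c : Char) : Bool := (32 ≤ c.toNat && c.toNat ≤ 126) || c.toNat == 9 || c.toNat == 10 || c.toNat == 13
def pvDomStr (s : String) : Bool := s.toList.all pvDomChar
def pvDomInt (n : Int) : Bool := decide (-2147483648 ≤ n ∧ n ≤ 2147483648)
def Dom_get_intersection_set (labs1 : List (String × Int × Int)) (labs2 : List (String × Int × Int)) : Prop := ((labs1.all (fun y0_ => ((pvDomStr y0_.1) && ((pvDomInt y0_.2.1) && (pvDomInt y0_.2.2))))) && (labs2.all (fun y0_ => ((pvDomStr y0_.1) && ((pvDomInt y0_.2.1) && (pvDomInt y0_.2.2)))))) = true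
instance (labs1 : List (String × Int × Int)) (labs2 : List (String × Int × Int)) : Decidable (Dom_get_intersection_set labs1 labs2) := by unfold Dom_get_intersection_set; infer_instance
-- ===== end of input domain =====

-- B indexes labs2 by entity type once and decides overlap with the closed-form test max(starts) < min(ends); A scans all of labs2 and every integer position of the interval.

-- ===== PORT A =====
-- the 'for i in range(la1[1], la1[2]): if i >= la2[1] and i < la2[2]: … break' loop,
-- counting i up from s1 (exact for range with step 1); returns whether it appended
def pvInnerA (i e1 s2 e2 : Int) : Bool :=
  if i < e1 then
    if s2 ≤ i ∧ i < e2 then true else pvInnerA (i + 1) e1 s2 e2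
  else false
termination_by (e1 - i).toNat
decreasing_by omega

-- the 'for la2 in labs2: … if found: break' loop (returns found)
def pvOuterA (la1 : String × Int × Int) (labs2 : List (String × Int × Int)) : Bool :=
  match labs2 with
  | [] => false
  | la2 :: rest =>
    if la1.1 == la2.1 then
      if pvInnerA la1.2.1 la1.2.2 la2.2.1 la2.2.2 then true
      else pvOuterA la1 rest
    else pvOuterA la1 rest

def get_intersection_set (labs1 : List (String × Int × Int)) (labs2 : List (String × Int × Int)) : List (String × Int × Int) :=
  labs1.foldl (fun intersection la1 =>
    if pvOuterA la1 labs2 then intersection ++ [la1] else intersection) []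

-- ===== PORT B =====
-- index: type -> list of its (start, end) intervals, built in one pass
def pvIndexB (labs2 : List (String × Int × Int)) : PySem.Dict String (List (Int × Int)) :=
  labs2.foldl (fun d la => d.insert la.1 (d.getD la.1 [] ++ [la.2])) PySem.Dict.empty

def get_intersection_set_alt (labs1 : List (String × Int × Int)) (labs2 : List (String × Int × Int)) : List (String × Int × Int) :=
  let index := pvIndexB labs2
  labs1.filter (fun la =>
    (index.getD la.1 []).any (fun se => decide (max la.2.1 se.1 < min la.2.2 se.2)))

-- ===== PRECONDITION & SPEC =====
def Spec_get_intersection_set (labs1 : List (String × Int × Int)) (labs2 : List (String × Int × Int)) (out : List (String × Int × Int)) : Prop := out = get_intersection_set_alt labs1 labs2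
instance (labs1 : List (String × Int × Int)) (labs2 : List (String × Int × Int)) (out : List (String × Int × Int)) : Decidable (Spec_get_intersection_set labs1 labs2 out) := by unfold Spec_get_intersection_set; infer_instance

-- ===== CLAIM (what is proved, stated in full; the proofs are below) =====
def Claim_equal_get_intersection_set : Prop := ∀ (labs1 : List (String × Int × Int)) (labs2 : List (String × Int × Int)), Dom_get_intersection_set labs1 labs2 → Spec_get_intersection_set labs1 labs2 (get_intersection_set labs1 labs2)

-- ===== LEMMAS AND PROOFS =====

-- A's integer scan finds a point iff one exists
theorem pvInnerA_any_aux (e1 s2 e2 : Int) (n : Nat) :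
    ∀ i : Int, (e1 - i).toNat = n →
      (pvInnerA i e1 s2 e2 = true ↔ ∃ j, (i ≤ j ∧ j < e1) ∧ (s2 ≤ j ∧ j < e2)) := by
  induction n with
  | zero =>
    intro i hi
    rw [pvInnerA, if_neg (by omega)]
    constructor
    · intro h; exact absurd h Bool.false_ne_true
    · rintro ⟨j, ⟨_, hj2⟩, _⟩; exact absurd hj2 (by omega)
  | succ n ih =>
    intro i hi
    rw [pvInnerA, if_pos (by omega)]
    by_cases hc : s2 ≤ i ∧ i < e2
    · rw [if_pos hc]
      exact ⟨fun _ => ⟨i, ⟨le_refl i, by omega⟩, hc⟩, fun _ => rfl⟩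
    · rw [if_neg hc, ih (i + 1) (by omega)]
      constructor
      · rintro ⟨j, hj1, hj2⟩; exact ⟨j, by omega, hj2⟩
      · rintro ⟨j, hj1, hj2⟩; exact ⟨j, by omega, hj2⟩

theorem pvInnerA_any (i e1 s2 e2 : Int) :
    pvInnerA i e1 s2 e2 = true ↔ ∃ j, (i ≤ j ∧ j < e1) ∧ (s2 ≤ j ∧ j < e2) :=
  pvInnerA_any_aux e1 s2 e2 (e1 - i).toNat i rfl

-- A's scan over range(s1, e1) finds a point of [s2, e2) iff the intervals overlap
theorem pvInnerA_eq (s1 e1 s2 e2 : Int) :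
    pvInnerA s1 e1 s2 e2 = decide (max s1 s2 < min e1 e2) := by
  rw [Bool.eq_iff_iff, pvInnerA_any]
  simp only [decide_eq_true_eq]
  constructor
  · rintro ⟨i, h1, h2⟩; omega
  · intro h; exact ⟨max s1 s2, by omega, by omega⟩

-- A reports la1 iff some same-type entity of labs2 overlaps it
theorem pvOuterA_any (la1 : String × Int × Int) (labs2 : List (String × Int × Int)) :
    pvOuterA la1 labs2 = true ↔
      ∃ la2 ∈ labs2, la2.1 = la1.1 ∧ max la1.2.1 la2.2.1 < min la1.2.2 la2.2.2 := by
  induction labs2 with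
  | nil => simp [pvOuterA]
  | cons la2 rest ih =>
    by_cases heq : la1.1 = la2.1
    · by_cases hov : max la1.2.1 la2.2.1 < min la1.2.2 la2.2.2
      · constructor
        · intro _; exact ⟨la2, List.mem_cons_self, heq.symm, hov⟩
        · intro _; simp [pvOuterA, pvInnerA_eq, heq, hov]
      · have hl : pvOuterA la1 (la2 :: rest) = pvOuterA la1 rest := by
          simp [pvOuterA, pvInnerA_eq, heq, hov]
        rw [hl, ih]
        constructor
        · rintro ⟨x, hx, hp⟩; exact ⟨x, List.mem_cons_of_mem _ hx, hp⟩
        · rintro ⟨x, hx, h1, h2⟩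
          rcases List.mem_cons.mp hx with rfl | hx'
          · exact absurd h2 hov
          · exact ⟨x, hx', h1, h2⟩
    · have hl : pvOuterA la1 (la2 :: rest) = pvOuterA la1 rest := by
        simp [pvOuterA, heq]
      rw [hl, ih]
      constructor
      · rintro ⟨x, hx, hp⟩; exact ⟨x, List.mem_cons_of_mem _ hx, hp⟩
      · rintro ⟨x, hx, h1, h2⟩
        rcases List.mem_cons.mp hx with rfl | hx'
        · exact absurd h1.symm heq
        · exact ⟨x, hx', h1, h2⟩

-- the per-type index holds exactly the intervals of that type, in order
theorem pvIndexB_getD (labs2 : List (String × Int × Int)) (d : PySem.Dict String (List (Int × Int))) (t : String) :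
    ((labs2.foldl (fun d la => d.insert la.1 (d.getD la.1 [] ++ [la.2])) d).getD t []) =
      d.getD t [] ++ (labs2.filter (fun la => la.1 == t)).map (·.2) := by
  induction labs2 generalizing d with
  | nil => simp
  | cons la rest ih =>
    rw [List.foldl_cons, ih]
    by_cases heq : la.1 = t
    · simp [heq, List.append_assoc]
    · have h2 : ¬ t = la.1 := fun h => heq h.symm
      rw [PySem.Dict.getD_insert, if_neg h2]
      simp [heq]

-- ===== VERDICT (by name: the statement is the Claim_ definition above) =====
theorem get_intersection_set_spec : Claim_equal_get_intersection_set := by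
  intro labs1 labs2 _
  unfold Spec_get_intersection_set get_intersection_set get_intersection_set_alt
  rw [PySem.List.foldl_append_if_eq_filter]
  simp only [List.nil_append]
  apply List.filter_congr
  intro la _
  rw [Bool.eq_iff_iff, pvOuterA_any]
  unfold pvIndexB
  rw [pvIndexB_getD]
  have hempty : (PySem.Dict.empty : PySem.Dict String (List (Int × Int))).getD la.1 [] = [] := by
    simp [pysem]
  rw [hempty, List.nil_append]
  simp only [List.any_eq_true, List.mem_map, List.mem_filter, decide_eq_true_eq, beq_iff_eq]
  constructor
  · rintro ⟨la2, hmem, h1, h2⟩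
    exact ⟨la2.2, ⟨la2, ⟨hmem, h1⟩, rfl⟩, h2⟩
  · rintro ⟨se, ⟨la2, ⟨hmem, h1⟩, hse⟩, h2⟩
    exact ⟨la2, hmem, h1, hse ▸ h2⟩
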